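-- pv_equiv track=rewrite | github.com/makeai-org/builder-demo | builder.py | doKeras
-- ===== SOURCE A (Python) =====
-- def unique(list):
--     found = []
--     uni = 0
--     for pos,val in enumerate(list):
--         if val not in found:
--             uni += 1
--             found.append(val)
--     return uni
--
-- def doKeras(labels):
--     ret_mat = []
--     classes = unique(labels)
--     found = []
--     for i,val in enumerate(labels):
--         if val not in found:
--             found.append(val)
--     for i,val in enumerate(labels):
--         temp = []
--         for pos,string in enumerate(found):
--             if string == val:
--                 temp.append(1)
--             else:
--                 temp.append(0)
--         ret_mat.append(temp)
--     return ret_mat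
-- ===== SOURCE B (Python) =====
-- def doKeras(labels):
--     classes = list(dict.fromkeys(labels))
--     cols = [[1 if l == c else 0 for l in labels] for c in classes]
--     return [list(row) for row in zip(*cols)]
-- ===== Notes on version B (the rewrite author's own statement) =====
-- stated objective: idiomatic
-- what changed: Builds the matrix column-by-column (one 0/1 indicator column per class from dict.fromkeys) and transposes with zip(*cols), instead of A's row-by-row inner scan over the found classes; drops the unused unique()/classes computation.
import Mathlib
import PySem

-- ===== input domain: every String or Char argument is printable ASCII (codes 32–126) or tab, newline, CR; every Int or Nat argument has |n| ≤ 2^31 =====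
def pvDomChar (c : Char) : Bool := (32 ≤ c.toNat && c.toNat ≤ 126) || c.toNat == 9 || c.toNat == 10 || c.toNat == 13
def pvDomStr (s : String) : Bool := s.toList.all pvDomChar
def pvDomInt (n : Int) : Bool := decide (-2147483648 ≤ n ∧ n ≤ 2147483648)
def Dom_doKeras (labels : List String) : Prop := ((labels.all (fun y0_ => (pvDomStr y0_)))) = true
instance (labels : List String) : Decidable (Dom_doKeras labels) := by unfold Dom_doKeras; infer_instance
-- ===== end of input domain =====

-- B builds the one-hot matrix column-by-column (one indicator column per first-appearance
-- class) and transposes with zip(*cols), instead of A's row-by-row inner comparison scan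
-- (objective: idiomatic; the unused unique()/classes pass is dropped).

-- ===== PORT A =====
-- helper `unique` of A (its result `classes` is computed and unused, as in A)
def uniqueAux : List String → List String → Int → Int
  | [], _, uni => uni
  | v :: rest, found, uni =>
    if found.contains v then uniqueAux rest found uni
    else uniqueAux rest (found ++ [v]) (uni + 1)

def «unique» (l : List String) : Int := uniqueAux l [] 0

-- A's first loop: build `found`, the distinct labels in first-appearance order
def buildFound : List String → List String → List String
  | [], found => found
  | v :: rest, found =>
    if found.contains v then buildFound rest found
    else buildFound rest (found ++ [v])

def doKeras (labels : List String) : List (List Int) :=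
  let _classes := «unique» labels
  let found := buildFound labels []
  labels.map (fun val => found.map (fun s => if s == val then (1 : Int) else 0))

-- ===== PORT B =====
-- zip(*cols): emit the tuple of heads while every column is nonempty (Python zip stops
-- at the shortest iterable, i.e. as soon as some column is exhausted)
def zipStar (cols : List (List Int)) : List (List Int) :=
  if h : cols ≠ [] ∧ ∀ c ∈ cols, c ≠ [] then
    (cols.map (fun c => c.headD 0)) :: zipStar (cols.map List.tail)
  else []
termination_by (cols.headD []).length
decreasing_by
  rcases cols with _ | ⟨c, cs⟩
  · exact absurd rfl h.1
  · have hc : c ≠ [] := h.2 c (List.mem_cons_self)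
    rcases c with _ | ⟨x, t⟩
    · exact absurd rfl hc
    · simp

def doKeras_alt (labels : List String) : List (List Int) :=
  let classes := PySem.List.dedup labels
  let cols := classes.map (fun c => labels.map (fun l => if l == c then (1 : Int) else 0))
  zipStar cols

-- ===== PRECONDITION & SPEC =====
def Spec_doKeras (labels : List String) (out : List (List Int)) : Prop := out = doKeras_alt labels
instance (labels : List String) (out : List (List Int)) : Decidable (Spec_doKeras labels out) := by unfold Spec_doKeras; infer_instance

-- ===== CLAIM (what is proved, stated in full; the proofs are below) =====
def Claim_equal_doKeras : Prop := ∀ (labels : List String), Dom_doKeras labels → Spec_doKeras labels (doKeras labels)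

-- ===== LEMMAS AND PROOFS =====

-- A's found-building loop is foldl of Set.add, hence computes PySem.List.dedup
theorem buildFound_eq_foldl (labels : List String) :
    ∀ (f : List String), buildFound labels f = labels.foldl PySem.Set.add f := by
  induction labels with
  | nil => intro f; simp [buildFound]
  | cons v rest ih =>
    intro f
    simp only [buildFound, List.foldl_cons, PySem.Set.add]
    by_cases h : v ∈ f <;> simp [h, ih]

theorem buildFound_eq_dedup (labels : List String) :
    buildFound labels [] = PySem.List.dedup labels := by
  rw [buildFound_eq_foldl, PySem.List.dedup_eq_ofList, PySem.Set.ofList_eq_foldl]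

-- transposing the rectangular column matrix yields the row-major one-hot matrix
theorem zipStar_rect (classes : List String) (hne : classes ≠ []) (ls : List String) :
    zipStar (classes.map (fun c => ls.map (fun l => if l == c then (1 : Int) else 0)))
      = ls.map (fun v => classes.map (fun c => if v == c then (1 : Int) else 0)) := by
  induction ls with
  | nil =>
    rw [zipStar]
    rcases classes with _ | ⟨c, cs⟩
    · exact absurd rfl hne
    · simp
  | cons v rest ih =>
    rw [zipStar]
    have hcols : (classes.map (fun c => (v :: rest).map (fun l => if l == c then (1 : Int) else 0))) ≠ []
        ∧ ∀ col ∈ classes.map (fun c => (v :: rest).map (fun l => if l == c then (1 : Int) else 0)), col ≠ [] := by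
      constructor
      · simpa using hne
      · intro col hcol
        rcases List.mem_map.mp hcol with ⟨c, _, rfl⟩
        simp
    rw [dif_pos hcols]
    simp only [List.map_map, Function.comp_def, List.map_cons, List.headD_cons, List.tail_cons]
    rw [ih]

-- ===== VERDICT (by name: the statement is the Claim_ definition above) =====
theorem doKeras_spec : Claim_equal_doKeras := by
  intro labels _
  unfold Spec_doKeras doKeras doKeras_alt
  rw [buildFound_eq_dedup]
  rcases hl : labels with _ | ⟨v, rest⟩
  · simp [PySem.List.dedup, PySem.Set.ofList, zipStar]
  · have hne : PySem.List.dedup (v :: rest) ≠ [] := by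
      have : v ∈ PySem.List.dedup (v :: rest) := (PySem.List.mem_dedup _ _).mpr (List.mem_cons_self)
      exact List.ne_nil_of_mem this
    rw [zipStar_rect _ hne]
    apply List.map_congr_left
    intro x _
    apply List.map_congr_left
    intro c _
    rw [Bool.beq_comm]
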